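-- pv_equiv track=rewrite | github.com/lfscheidegger/aoc2023 | day11.py | expand_input_2
-- ===== SOURCE A (Python) =====
-- from typing import List, Tuple
--
-- def expand_input_2(input: List[str]) -> List[str]:
--     result: List[str] = []
--
--     for line in input:
--         if all([x == '.' for x in line]):
--             result.append("".join(['X' for _ in line]))
--         else:
--             result.append(line)
--
--     final_result = []
--     for r, line in enumerate(result):
--         new_row = ''
--         for c, _ in enumerate(line):
--             if all([result[r2][c] in ['.', 'X'] for r2 in range(len(result))]):
--                 new_row += 'X'
--             else:
--                 new_row += line[c]
--         final_result.append(new_row)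
--
--     return final_result
-- ===== SOURCE B (Python) =====
-- from typing import List
--
-- def expand_input_2(input: List[str]) -> List[str]:
--     empty_row = [all(ch == '.' for ch in line) for line in input]
--     width = len(input[0]) if input else 0
--     empty_col = [all(empty_row[r] or input[r][c] in '.X' for r in range(len(input)))
--                  for c in range(width)]
--     return [''.join('X' if empty_row[r] or empty_col[c] else line[c]
--                     for c in range(len(line)))
--             for r, line in enumerate(input)]
-- ===== Notes on version B (the rewrite author's own statement) =====
-- stated objective: faster
-- what changed: B precomputes an empty-row table and an empty-column table in one O(R*C) pass and builds the output in a single pass, instead of A's two-phase rewrite that rescans every row for every cell; Pre_ excludes ragged inputs (rows of unequal length), on which A raises IndexError.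
import Mathlib
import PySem

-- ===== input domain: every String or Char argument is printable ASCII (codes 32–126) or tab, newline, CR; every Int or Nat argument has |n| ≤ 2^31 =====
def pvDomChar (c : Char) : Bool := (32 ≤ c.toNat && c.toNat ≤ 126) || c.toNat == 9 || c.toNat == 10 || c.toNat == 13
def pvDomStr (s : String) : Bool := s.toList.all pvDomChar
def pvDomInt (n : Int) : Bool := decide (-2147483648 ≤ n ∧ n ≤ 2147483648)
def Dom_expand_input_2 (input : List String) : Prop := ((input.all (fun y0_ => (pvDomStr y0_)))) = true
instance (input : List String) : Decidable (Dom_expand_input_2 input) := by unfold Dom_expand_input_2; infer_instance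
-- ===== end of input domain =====

-- B replaces A's per-cell column rescans by one precomputed empty-row / empty-column table and a single output pass (faster in a timing run).

-- ===== PORT A =====
def expand_input_2 (input : List String) : List String :=
  let result := input.map (fun line =>
    if (line.toList.map (fun x => x == '.')).all (fun b => b) then
      String.ofList (line.toList.map (fun _ => 'X'))
    else line)
  (PySem.List.enumerate result).map (fun rl =>
    String.ofList ((PySem.List.enumerate rl.2.toList).foldl (fun acc cp =>
      acc ++ [if ((PySem.List.pyRange 0 (result.length : Int) 1).map (fun r2 =>
                    let ch := PySem.List.pyGetD (PySem.List.pyGetD result r2 "").toList cp.1 '?'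
                    ch == '.' || ch == 'X')).all (fun b => b)
              then 'X'
              else PySem.List.pyGetD rl.2.toList cp.1 '?']) []))

-- ===== PORT B =====
def expand_input_2_alt (input : List String) : List String :=
  let emptyRow := input.map (fun line => line.toList.all (fun ch => ch == '.'))
  let width := (input.headD "").toList.length
  let emptyCol := (List.range width).map (fun c =>
    (List.range input.length).all (fun r =>
      emptyRow.getD r false ||
      (let ch := ((input.getD r "").toList).getD c ' '; ch == '.' || ch == 'X')))
  (PySem.List.enumerate input).map (fun rl =>
    String.ofList ((List.range rl.2.toList.length).map (fun c =>
      if emptyRow.getD rl.1.toNat false || emptyCol.getD c false then 'X'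
      else rl.2.toList.getD c ' ')))

-- ===== PRECONDITION & SPEC =====
-- Pre_ excludes ragged inputs (rows of unequal length), on which A raises IndexError.
def Pre_expand_input_2 (input : List String) : Prop :=
  ∀ s ∈ input, ∀ t ∈ input, PySem.Str.len s = PySem.Str.len t
instance (input : List String) : Decidable (Pre_expand_input_2 input) := by
  unfold Pre_expand_input_2; infer_instance
def pvWitness_expand_input_2 : List String := ["..#", "...", ".#."]

def Spec_expand_input_2 (input : List String) (out : List String) : Prop := out = expand_input_2_alt input
instance (input : List String) (out : List String) : Decidable (Spec_expand_input_2 input out) := by unfold Spec_expand_input_2; infer_instance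

-- ===== CLAIM (what is proved, stated in full; the proofs are below) =====
def Claim_equal_expand_input_2 : Prop := ∀ (input : List String), Dom_expand_input_2 input → Pre_expand_input_2 input → Spec_expand_input_2 input (expand_input_2 input)

-- ===== LEMMAS AND PROOFS =====

lemma pv_enum_getElem {α : Type} (xs : List α) (s : Int) (i : Nat) (h : i < xs.length) :
    (PySem.List.enumerate xs s)[i]'(by rw [PySem.List.length_enumerate]; exact h) = (s + i, xs[i]) := by
  induction xs generalizing s i with
  | nil => simp at h
  | cons x xs ih =>
    cases i with
    | zero => simp [PySem.List.enumerate_cons]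
    | succ j =>
      have hj : j < xs.length := by simpa using h
      have hrec := ih (s+1) j hj
      simp only [PySem.List.enumerate_cons, List.getElem_cons_succ, hrec]
      refine Prod.ext ?_ rfl
      push_cast; ring

lemma pv_all_map_id {α : Type} (l : List α) (f : α → Bool) :
    ((List.map f l).all fun b => b) = l.all f := by
  simp [List.all_map]; rfl

lemma pv_all_congr {α : Type} {l : List α} {p q : α → Bool}
    (h : ∀ x ∈ l, p x = q x) : l.all p = l.all q := by
  induction l with
  | nil => rfl
  | cons a t ih =>
    simp only [List.all_cons, h a List.mem_cons_self,
      ih (fun x hx => h x (List.mem_cons_of_mem _ hx))]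

theorem pv_main (input : List String) (pre : Pre_expand_input_2 input) :
    expand_input_2 input = expand_input_2_alt input := by
  have hw : ∀ i (h : i < input.length), input[i].toList.length = (input.headD "").toList.length := by
    intro i h
    cases input with
    | nil => simp at h
    | cons a l =>
      have h2 := pre _ (List.getElem_mem h) a List.mem_cons_self
      simp only [PySem.Str.len_eq, Nat.cast_inj] at h2
      simpa using h2
  unfold expand_input_2 expand_input_2_alt
  simp only [pv_all_map_id]
  set res := List.map (fun line => if (line.toList.all fun x => x == '.') = true then String.ofList (List.map (fun x => 'X') line.toList) else line) input with hresdef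
  set er := List.map (fun line => line.toList.all fun x => x == '.') input with herdef
  have hreslen : res.length = input.length := by simp [hresdef]
  have hrowlen : ∀ i (hi : i < input.length),
      (res[i]'(by omega)).toList.length = input[i].toList.length := by
    intro i hi
    simp only [hresdef, List.getElem_map]
    split <;> simp
  have hreschar : ∀ i (hi : i < input.length) (c : Nat) (hc : c < input[i].toList.length),
      (res[i]'(by omega)).toList.getD c '?' =
        if input[i].toList.all (fun x => x == '.') then 'X' else input[i].toList[c] := by
    intro i hi c hc
    simp only [hresdef, List.getElem_map]
    split
    · rw [String.toList_ofList, List.getD_eq_getElem _ _ (by simpa using hc)]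
      simp
    · rw [List.getD_eq_getElem _ _ hc]
  set ec := List.map (fun c => (List.range input.length).all fun r => er.getD r false || ((input.getD r "").toList.getD c ' ' == '.' || (input.getD r "").toList.getD c ' ' == 'X')) (List.range (input.headD "").toList.length) with hecdef
  have herget : ∀ i (hi : i < input.length),
      er.getD i false = input[i].toList.all (fun x => x == '.') := by
    intro i hi
    rw [herdef, List.getD_eq_getElem _ _ (by simpa using hi)]
    simp
  have hcond : ∀ c (hc : c < (input.headD "").toList.length),
      ((PySem.List.pyRange 0 ↑res.length).all fun r2 =>
          PySem.List.pyGetD (PySem.List.pyGetD res r2 "").toList (↑c) '?' == '.' ||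
            PySem.List.pyGetD (PySem.List.pyGetD res r2 "").toList (↑c) '?' == 'X') = ec.getD c false := by
    intro c hc
    rw [hecdef, List.getD_eq_getElem _ _ (by simpa using hc)]
    rw [PySem.List.pyRange_one, List.all_map]
    rw [show ((res.length : Int) - 0).toNat = input.length by omega]
    simp only [List.getElem_map, List.getElem_range]
    apply pv_all_congr
    intro k hk
    have hki : k < input.length := by simpa using hk
    have hkr : k < res.length := by omega
    simp only [Function.comp, zero_add, PySem.List.pyGetD_natCast]
    rw [List.getD_eq_getElem _ _ hkr, List.getD_eq_getElem _ _ hki]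
    have hck : c < input[k].toList.length := by rw [hw k hki]; exact hc
    rw [List.getD_eq_getElem _ _ (by rw [hrowlen k hki]; exact hck),
        List.getD_eq_getElem _ _ hck]
    rw [show (res[k]'hkr).toList[c]'(by rw [hrowlen k hki]; exact hck) =
          (res[k]'hkr).toList.getD c '?' by
        rw [List.getD_eq_getElem _ _ (by rw [hrowlen k hki]; exact hck)]]
    rw [hreschar k hki c hck, herget k hki]
    by_cases he : input[k].toList.all (fun x => x == '.') = true <;> simp [he]
  apply List.ext_getElem
  · simp [PySem.List.length_enumerate, hreslen]
  intro r h1 h2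
  have hr : r < input.length := by simpa [PySem.List.length_enumerate] using h2
  simp only [List.getElem_map]
  rw [pv_enum_getElem res 0 r (by omega), pv_enum_getElem input 0 r hr]
  dsimp only
  rw [PySem.List.foldl_append_singleton_eq_map]
  simp only [List.nil_append]
  congr 1
  apply List.ext_getElem
  · simp [PySem.List.length_enumerate, hrowlen r hr]
  intro c hc1 hc2
  have hcr : c < input[r].toList.length := by simpa using hc2
  simp only [List.getElem_map, List.getElem_range]
  rw [pv_enum_getElem _ 0 c (by rw [hrowlen r hr]; exact hcr)]
  dsimp only
  simp only [zero_add, Int.toNat_natCast]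
  rw [hcond c (by rw [← hw r hr]; exact hcr)]
  rw [PySem.List.pyGetD_natCast]
  rw [hreschar r hr c hcr, herget r hr]
  rw [List.getD_eq_getElem _ _ hcr]
  by_cases hb1 : input[r].toList.all (fun x => x == '.') = true <;>
    by_cases hb2 : ec.getD c false = true <;> simp only [hb1, hb2, Bool.false_or, Bool.true_or, if_true] <;> rfl

-- ===== VERDICT (by name: the statement is the Claim_ definition above) =====
theorem expand_input_2_spec : Claim_equal_expand_input_2 := by
  intro input _ pre
  unfold Spec_expand_input_2
  exact pv_main input pre
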